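-- pv_equiv track=rewrite | github.com/SilverLuhtoja/AoC-2024 | day_9/main.py | fill_empty_space
-- ===== SOURCE A (Python) =====
-- def fill_empty_space(file):
--     chars = list(file)
--     n = len(chars)
--
--     for i in range(n):
--         if file[i] == None:
--             for j in range(n - 1, i, -1):
--                 if file[j] != None:
--                     file[i] = file[j]
--                     file[j] = None
--                     break
--
--     return file
-- ===== SOURCE B (Python) =====
-- def fill_empty_space(file):
--     # O(n): count values, fill the None gaps in the first-m prefix from the
--     # reversed list of values that sit beyond position m; mutates file like A does.
--     n = len(file)
--     m = sum(1 for x in file if x is not None)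
--     src = [x for x in file[m:] if x is not None]
--     src.reverse()
--     out = []
--     k = 0
--     for x in file[:m]:
--         if x is not None:
--             out.append(x)
--         else:
--             out.append(src[k])
--             k += 1
--     out.extend([None] * (n - m))
--     file[:] = out
--     return file
-- ===== Notes on version B (the rewrite author's own statement) =====
-- stated objective: faster
-- what changed: Replaced the nested right-to-left scan per gap by a single-pass construction: count the non-None values m, collect the values beyond position m in reverse, and fill the None gaps of the first m slots from that list, padding with None.
import Mathlib
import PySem

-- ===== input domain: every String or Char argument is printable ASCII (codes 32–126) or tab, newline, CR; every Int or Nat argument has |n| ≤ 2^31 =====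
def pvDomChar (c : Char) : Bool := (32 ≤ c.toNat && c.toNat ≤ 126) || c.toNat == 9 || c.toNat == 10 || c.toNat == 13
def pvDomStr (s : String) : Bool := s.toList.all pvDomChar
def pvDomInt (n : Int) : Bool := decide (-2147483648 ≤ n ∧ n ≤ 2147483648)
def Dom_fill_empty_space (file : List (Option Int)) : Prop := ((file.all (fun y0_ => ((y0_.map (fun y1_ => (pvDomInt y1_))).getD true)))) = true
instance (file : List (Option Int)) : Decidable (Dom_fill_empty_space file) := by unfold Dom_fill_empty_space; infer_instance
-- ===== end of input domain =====

-- B replaces A's quadratic gap-by-gap rightmost scan by a single linear pass (count values,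
-- fill the prefix gaps from the reversed tail values); both A and B mutate the argument list
-- in place in Python, and the equivalence proved here is about the returned value (which both
-- also leave in the argument).


-- ===== PORT A =====
-- inner loop `for j in range(n-1, i, -1): if file[j] != None: …; break`,
-- scanning j downwards until j ≤ i; indices are always in range, so `getD` is exact Python indexing.
def aInner (cur : List (Option Int)) (i j : Nat) : List (Option Int) :=
  if _h : j ≤ i then cur
  else
    match cur.getD j none with
    | some v => (cur.set i (some v)).set j none
    | none => aInner cur i (j - 1)
termination_by j
decreasing_by omega

-- outer loop `for i in range(n): if file[i] == None: <inner loop>` over the mutated list.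
def fill_empty_space (file : List (Option Int)) : List (Option Int) :=
  let n := file.length
  (List.range n).foldl (fun cur i => if cur.getD i none = none then aInner cur i (n - 1) else cur) file

-- ===== PORT B =====
-- `out.append(x)` / `out.append(src[k]); k += 1` loop of Source B: walk file[:m], consuming src in order.
-- (the `[] => none` source branch is unreachable: the prefix has exactly as many gaps as src has elements)
def fillGaps : List (Option Int) → List (Option Int) → List (Option Int)
  | [], _ => []
  | some v :: xs, src => some v :: fillGaps xs src
  | none :: xs, s :: rest => s :: fillGaps xs rest
  | none :: xs, [] => none :: fillGaps xs []

def fill_empty_space_alt (file : List (Option Int)) : List (Option Int) :=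
  let m := (file.filter (fun x => x.isSome)).length
  let src := ((file.drop m).filter (fun x => x.isSome)).reverse
  fillGaps (file.take m) src ++ List.replicate (file.length - m) none

-- ===== PRECONDITION & SPEC =====
def Spec_fill_empty_space (file : List (Option Int)) (out : List (Option Int)) : Prop := out = fill_empty_space_alt file
instance (file : List (Option Int)) (out : List (Option Int)) : Decidable (Spec_fill_empty_space file out) := by unfold Spec_fill_empty_space; infer_instance

-- ===== CLAIM (what is proved, stated in full; the proofs are below) =====
def Claim_equal_fill_empty_space : Prop := ∀ (file : List (Option Int)), Dom_fill_empty_space file → Spec_fill_empty_space file (fill_empty_space file)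

-- ===== LEMMAS AND PROOFS =====

-- first `some` of a list, blanking it (what one downward scan of A finds, seen on the reversed tail)
def scan1 : List (Option Int) → Option (Int × List (Option Int))
  | [] => none
  | some v :: r => some (v, none :: r)
  | none :: r => (scan1 r).map (fun p => (p.1, none :: p.2))

-- blank the first t `some`s of a list
def blank : Nat → List (Option Int) → List (Option Int)
  | _, [] => []
  | 0, xs => xs
  | t+1, some _ :: xs => none :: blank t xs
  | t+1, none :: xs => none :: blank (t+1) xs

def cntN (xs : List (Option Int)) : Nat := (xs.filter (fun x => x.isNone)).length

-- result of one downward scan of A over a reversed tail r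
def res1 (r : List (Option Int)) : List (Option Int) :=
  match scan1 r with
  | some (v, r') => some v :: r'.reverse
  | none => none :: r.reverse

lemma length_blank (t : Nat) (r : List (Option Int)) : (blank t r).length = r.length := by
  induction r generalizing t with
  | nil => cases t <;> simp [blank]
  | cons x xs ih =>
    cases t with
    | zero => simp [blank]
    | succ t => cases x <;> simp [blank, ih]

lemma blank_zero (xs : List (Option Int)) : blank 0 xs = xs := by
  cases xs <;> simp [blank]

lemma blank_none (t : Nat) (xs : List (Option Int)) :
    blank t (none :: xs) = none :: blank t xs := by
  cases t <;> simp [blank, blank_zero]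

lemma getD_append_len {α : Type} (a b : List α) (d : α) :
    (a ++ b).getD a.length d = b.headD d := by
  induction a with
  | nil => cases b <;> simp [List.getD]
  | cons x xs ih => simpa using ih

lemma set_append_len {α : Type} (a : List α) (x : α) (b : List α) (z : α) :
    (a ++ x :: b).set a.length z = a ++ z :: b := by
  induction a with
  | nil => simp
  | cons y ys ih => simpa using ih

lemma scan1_append (a b : List (Option Int)) :
    scan1 (a ++ b) = match scan1 a with
      | some (v, a') => some (v, a' ++ b)
      | none => (scan1 b).map (fun p => (p.1, a ++ p.2)) := by
  induction a with
  | nil => cases h : scan1 b <;> simp [scan1, h]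
  | cons x xs ih =>
    cases x with
    | some v => simp [scan1]
    | none =>
      simp only [List.cons_append, scan1, ih]
      cases h : scan1 xs with
      | some p => simp
      | none => cases scan1 b <;> simp

lemma scan1_blank_lt (r : List (Option Int)) (t : Nat)
    (h : t < (r.filter (fun x => x.isSome)).length) :
    ∃ v, (r.filter (fun x => x.isSome)).getD t none = some v ∧
      scan1 (blank t r) = some (v, blank (t+1) r) := by
  induction r generalizing t with
  | nil => simp at h
  | cons x xs ih =>
    cases x with
    | none =>
      simp only [List.filter_cons, Option.isSome_none] at h ⊢
      obtain ⟨v, hv, hs⟩ := ih t (by simpa using h)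
      exact ⟨v, by simpa using hv, by simp [blank_none, scan1, hs]⟩
    | some w =>
      cases t with
      | zero => exact ⟨w, by simp, by simp [blank, blank_zero, scan1]⟩
      | succ t =>
        simp only [List.filter_cons, Option.isSome_some, if_true, List.length_cons] at h
        obtain ⟨v, hv, hs⟩ := ih t (by omega)
        exact ⟨v, by simpa using hv, by simp [blank, scan1, hs]⟩

lemma blank_full (r : List (Option Int)) (t : Nat)
    (h : (r.filter (fun x => x.isSome)).length ≤ t) :
    blank t r = List.replicate r.length none := by
  induction r generalizing t with
  | nil => cases t <;> simp [blank]
  | cons x xs ih =>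
    cases x with
    | none =>
      cases t with
      | zero =>
        have h0 := ih 0 (by simpa using h)
        rw [blank_zero] at h0 ⊢
        rw [List.length_cons, List.replicate_succ]
        exact congrArg (List.cons none) h0
      | succ t =>
        simp only [List.filter_cons, Option.isSome_none] at h
        simp [blank, List.replicate_succ, ih (t+1) (by simpa using h)]
    | some w =>
      cases t with
      | zero => simp at h
      | succ t =>
        simp only [List.filter_cons, Option.isSome_some, if_true, List.length_cons] at h
        simp [blank, List.replicate_succ, ih t (by omega)]

lemma scan1_replicate (k : Nat) : scan1 (List.replicate k (none : Option Int)) = none := by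
  induction k with
  | zero => simp [scan1]
  | succ k ih => simp [List.replicate_succ, scan1, ih]

lemma lenSplit (xs : List (Option Int)) :
    cntN xs + (xs.filter (fun x => x.isSome)).length = xs.length := by
  induction xs with
  | nil => simp [cntN]
  | cons x l ih => cases x <;> simp [cntN, List.filter_cons] at ih ⊢ <;> omega

lemma aInner_eq (r : List (Option Int)) : ∀ (p q : List (Option Int)),
    aInner (p ++ none :: (r.reverse ++ q)) p.length (p.length + r.length)
      = p ++ res1 r ++ q := by
  induction r with
  | nil =>
    intro p q
    rw [aInner]
    simp [res1, scan1]
  | cons x r₂ ih =>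
    intro p q
    rw [aInner]
    have hlen : (p ++ none :: ((x :: r₂).reverse ++ q)).getD (p.length + (x :: r₂).length) none = x := by
      have hre : p ++ none :: ((x :: r₂).reverse ++ q) = (p ++ none :: r₂.reverse) ++ (x :: q) := by
        simp
      have hl : p.length + (x :: r₂).length = (p ++ none :: r₂.reverse).length := by
        simp <;> omega
      rw [hre, hl, getD_append_len]
      rfl
    rw [hlen]
    have hgt : ¬ (p.length + (x :: r₂).length ≤ p.length) := by simp
    rw [dif_neg hgt]
    cases x with
    | some v =>
      -- break: set position p.length to some v, position j to none
      have h1 : (p ++ none :: ((some v :: r₂).reverse ++ q)).set p.length (some v)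
          = p ++ some v :: (r₂.reverse ++ (some v) :: q) := by
        have := set_append_len p (none : Option Int) (((some v :: r₂).reverse ++ q)) (some v)
        simpa using this
      have h2 : (p ++ some v :: (r₂.reverse ++ (some v) :: q)).set (p.length + (some v :: r₂).length) none
          = p ++ some v :: (r₂.reverse ++ none :: q) := by
        have hre : p ++ some v :: (r₂.reverse ++ (some v) :: q)
            = (p ++ some v :: r₂.reverse) ++ (some v) :: q := by simp
        have hl : p.length + (some v :: r₂).length = (p ++ some v :: r₂.reverse).length := by
          simp <;> omega
        rw [hre, hl, set_append_len]
        simp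
      show ((p ++ none :: ((some v :: r₂).reverse ++ q)).set p.length (some v)).set
          (p.length + (some v :: r₂).length) none = p ++ res1 (some v :: r₂) ++ q
      rw [h1, h2]
      simp [res1, scan1]
    | none =>
      have hj : p.length + (none :: r₂).length - 1 = p.length + r₂.length := by simp
      have hre : p ++ none :: ((none :: r₂).reverse ++ q) = p ++ none :: (r₂.reverse ++ (none :: q)) := by
        simp
      show aInner (p ++ none :: ((none :: r₂).reverse ++ q)) p.length
          (p.length + (none :: r₂).length - 1) = p ++ res1 (none :: r₂) ++ q
      rw [hj, hre, ih p (none :: q)]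
      simp only [res1, scan1]
      cases h : scan1 r₂ with
      | some pr => simp
      | none => simp

def stepA (n : Nat) (cur : List (Option Int)) (i : Nat) : List (Option Int) :=
  if cur.getD i none = none then aInner cur i (n - 1) else cur

lemma fill_eq (file : List (Option Int)) :
    fill_empty_space file = (List.range file.length).foldl (stepA file.length) file := rfl

lemma L1 (mid : List (Option Int)) : ∀ (t : Nat) (F rtm : List (Option Int)) (n : Nat),
    n = F.length + mid.length + rtm.length →
    t + cntN mid = (rtm.filter (fun x => x.isSome)).length →
    (List.range' F.length mid.length).foldl (stepA n) (F ++ mid ++ (blank t rtm).reverse)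
      = F ++ fillGaps mid ((rtm.filter (fun x => x.isSome)).drop t)
          ++ (blank (t + cntN mid) rtm).reverse := by
  induction mid with
  | nil => intro t F rtm n hn hc; simp [fillGaps, cntN]
  | cons x mid' ih =>
    intro t F rtm n hn hc
    rw [List.length_cons, List.range'_succ, List.foldl_cons]
    have hguard : (F ++ (x :: mid') ++ (blank t rtm).reverse).getD F.length none = x := by
      have : F ++ (x :: mid') ++ (blank t rtm).reverse
          = F ++ (x :: (mid' ++ (blank t rtm).reverse)) := by simp
      rw [this, getD_append_len]; rfl
    cases x with
    | some v =>
      have hstep : stepA n (F ++ (some v :: mid') ++ (blank t rtm).reverse) F.length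
          = F ++ (some v :: mid') ++ (blank t rtm).reverse := by
        unfold stepA; rw [hguard]; simp
      rw [hstep]
      have hre : F ++ (some v :: mid') ++ (blank t rtm).reverse
          = (F ++ [some v]) ++ mid' ++ (blank t rtm).reverse := by simp
      have hcnt : cntN (some v :: mid') = cntN mid' := by simp [cntN, List.filter_cons]
      have hlen2 : F.length + 1 = (F ++ [some v]).length := by simp
      rw [hre, hlen2, ih t (F ++ [some v]) rtm n (by simp at hn ⊢; omega)
        (by rw [← hc, hcnt])]
      simp [fillGaps, hcnt]
    | none =>
      have hciter : cntN (none :: mid') = cntN mid' + 1 := by simp [cntN, List.filter_cons]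
      have hlt : t < (rtm.filter (fun x => x.isSome)).length := by omega
      obtain ⟨v, hv, hs⟩ := scan1_blank_lt rtm t hlt
      have hscan : scan1 (blank t rtm ++ mid'.reverse) = some (v, blank (t+1) rtm ++ mid'.reverse) := by
        rw [scan1_append, hs]
      have hstep : stepA n (F ++ (none :: mid') ++ (blank t rtm).reverse) F.length
          = F ++ some v :: (mid' ++ (blank (t+1) rtm).reverse) := by
        unfold stepA
        rw [hguard]
        simp only [if_pos rfl]
        have hre : F ++ (none :: mid') ++ (blank t rtm).reverse
            = F ++ none :: ((blank t rtm ++ mid'.reverse).reverse ++ []) := by simp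
        have hj : n - 1 = F.length + (blank t rtm ++ mid'.reverse).length := by
          simp [length_blank] at hn ⊢; omega
        rw [hre, hj, aInner_eq]
        simp [res1, hscan]
      rw [hstep]
      have hre2 : F ++ some v :: (mid' ++ (blank (t+1) rtm).reverse)
          = (F ++ [some v]) ++ mid' ++ (blank (t+1) rtm).reverse := by simp
      have hlen2 : F.length + 1 = (F ++ [some v]).length := by simp
      rw [hre2, hlen2, ih (t+1) (F ++ [some v]) rtm n (by simp at hn ⊢; omega)
        (by omega)]
      have hdrop : (rtm.filter (fun x => x.isSome)).drop t
          = some v :: (rtm.filter (fun x => x.isSome)).drop (t+1) := by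
        rw [List.drop_eq_getElem_cons hlt]
        rw [List.getD_eq_getElem _ _ hlt] at hv
        rw [hv]
      rw [hdrop]
      have hexp : t + 1 + cntN mid' = t + cntN (none :: mid') := by rw [hciter]; omega
      rw [hexp]
      simp [fillGaps]

lemma L2 (n m : Nat) (H : List (Option Int)) (hH : H.length = m) (hmn : m ≤ n) :
    ∀ (k i : Nat), m ≤ i → i + k ≤ n →
    (List.range' i k).foldl (stepA n) (H ++ List.replicate (n - m) none)
      = H ++ List.replicate (n - m) none := by
  intro k
  induction k with
  | zero => intro i _ _; simp
  | succ k ih =>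
    intro i hmi hik
    rw [List.range'_succ, List.foldl_cons]
    have hin : i < n := by omega
    have hsplit : H ++ List.replicate (n - m) none
        = (H ++ List.replicate (i - m) none) ++ none :: (List.replicate (n - 1 - i) (none : Option Int)) := by
      have hnm : n - m = (i - m) + (n - 1 - i + 1) := by omega
      rw [hnm, ← List.replicate_append_replicate, List.replicate_succ]
      simp
    have hplen : (H ++ List.replicate (i - m) (none : Option Int)).length = i := by
      simp [hH]; omega
    have hstep : stepA n (H ++ List.replicate (n - m) none) i = H ++ List.replicate (n - m) none := by
      have key := aInner_eq (List.replicate (n - 1 - i) (none : Option Int))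
        (H ++ List.replicate (i - m) none) []
      rw [hplen] at key
      simp only [List.reverse_replicate, List.append_nil] at key
      have hidx : i + (List.replicate (n - 1 - i) (none : Option Int)).length = n - 1 := by
        simp; omega
      have hres : res1 (List.replicate (n - 1 - i) (none : Option Int))
          = none :: List.replicate (n - 1 - i) none := by
        simp [res1, scan1_replicate, List.reverse_replicate]
      rw [hidx, hres] at key
      have hguard : (H ++ List.replicate (n - m) (none : Option Int)).getD i none = none := by
        rw [hsplit]
        have hg := getD_append_len (H ++ List.replicate (i - m) (none : Option Int))
          (none :: List.replicate (n - 1 - i) none) none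
        rw [hplen] at hg
        rw [hg]
        rfl
      unfold stepA
      rw [if_pos hguard]
      conv_lhs => rw [hsplit]
      rw [key, ← hsplit]
    rw [hstep]
    exact ih (i + 1) (by omega) (by omega)

lemma cnt_take (file : List (Option Int)) :
    cntN (file.take ((file.filter (fun x => x.isSome)).length))
      = ((file.drop ((file.filter (fun x => x.isSome)).length)).filter (fun x => x.isSome)).length := by
  set m := (file.filter (fun x => x.isSome)).length with hm
  have hmn : m ≤ file.length := by rw [hm]; exact List.length_filter_le _ _
  have hsum : (List.filter (fun x => x.isSome) (file.take m)).length
      + (List.filter (fun x => x.isSome) (file.drop m)).length = m := by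
    rw [hm]
    conv_rhs => rw [← List.take_append_drop m file]
    rw [List.filter_append, List.length_append]
  have h1 := lenSplit (file.take m)
  have hlt : (file.take m).length = m := by simp [hmn]
  omega

lemma length_fillGaps (xs : List (Option Int)) : ∀ s, (fillGaps xs s).length = xs.length := by
  induction xs with
  | nil => intro s; simp [fillGaps]
  | cons x l ihx =>
    intro s
    cases x with
    | some v => simp [fillGaps, ihx]
    | none => cases s <;> simp [fillGaps, ihx]

lemma mainEq (file : List (Option Int)) (m n : Nat)
    (hm : m = (file.filter (fun x => x.isSome)).length) (hn : n = file.length) :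
    (List.range n).foldl (stepA n) file
      = fillGaps (file.take m) (((file.drop m).filter (fun x => x.isSome)).reverse)
          ++ List.replicate (n - m) none := by
  have hmn : m ≤ n := by rw [hm, hn]; exact List.length_filter_le _ _
  have hmlen : (file.take m).length = m := by
    rw [List.length_take]; omega
  have hsplitr : List.range n = List.range' 0 m ++ List.range' m (n - m) := by
    rw [List.range_eq_range']
    have hh := List.range'_append (s := 0) (m := m) (n := n - m) (step := 1)
    simp at hh
    rw [hh]
    congr 1
    omega
  have hcnt0 : cntN (file.take m) = ((file.drop m).reverse.filter (fun x => x.isSome)).length := by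
    rw [List.filter_reverse, List.length_reverse, hm]
    exact cnt_take file
  have h1 := L1 (file.take m) 0 [] ((file.drop m).reverse) n
    (by simp [List.length_reverse, List.length_take, List.length_drop]; omega)
    (by rw [Nat.zero_add]; exact hcnt0)
  rw [blank_zero, List.reverse_reverse, List.nil_append, List.take_append_drop,
    List.length_nil, hmlen, Nat.zero_add, List.drop_zero, List.nil_append] at h1
  have hfull : blank (cntN (file.take m)) ((file.drop m).reverse)
      = List.replicate (n - m) none := by
    apply Eq.trans (blank_full _ _ (le_of_eq hcnt0.symm))
    rw [List.length_reverse, List.length_drop, ← hn]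
  rw [hfull, List.reverse_replicate, List.filter_reverse] at h1
  rw [hsplitr, List.foldl_append, h1]
  exact L2 n m _ (by rw [length_fillGaps, hmlen]) hmn (n - m) m (le_refl m) (by omega)

theorem fill_empty_space_spec : Claim_equal_fill_empty_space := by
  unfold Claim_equal_fill_empty_space
  intro file _
  unfold Spec_fill_empty_space
  rw [fill_eq]
  rw [mainEq file ((file.filter (fun x => x.isSome)).length) file.length rfl rfl]
  rfl
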